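-- pv_equiv track=rewrite | github.com/pcannon67/dialogs | src/dialog/parsing/analyse_verbal_structure.py | find_adv
-- ===== SOURCE A (Python) =====
-- adv_list=['here','tonight', 'yesterday', 'tomorrow', 'today', 'now']
--
-- def find_adv(phrase):
--
--     #If phrase is empty
--     if phrase ==[]:
--         return []
--
--     #If the adverb is in the list
--     for i in phrase:
--         for j in adv_list:
--             if j==i:
--                 return [i]+find_adv(phrase[phrase.index(i)+1:])
--
--     #Using a rule of grammar
--     for k in phrase:
--         if k.startswith('every'):
--             return [k]+find_adv(phrase[phrase.index(k)+1:])
--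
--     #Default case
--     return []
-- ===== SOURCE B (Python) =====
-- adv_list = ['here', 'tonight', 'yesterday', 'tomorrow', 'today', 'now']
--
-- def find_adv(phrase):
--     # Single left-to-right pass: collect adverbs; collect every-words but
--     # reset that collection whenever an adverb appears, so only the
--     # every-words after the LAST adverb survive.
--     adverbs = []
--     everies = []
--     for t in phrase:
--         if t in adv_list:
--             adverbs.append(t)
--             everies = []
--         elif t.startswith('every'):
--             everies.append(t)
--     return adverbs + everies
-- ===== Notes on version B (the rewrite author's own statement) =====
-- stated objective: simpler
-- what changed: Replaced A's find-first-then-recurse-on-a-slice scheme (repeated find?/index/slice passes) with a single left-to-right fold that collects adverbs and collects every-words while resetting the every-word collection at each adverb, so only every-words after the last adverb survive.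
import Mathlib
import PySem

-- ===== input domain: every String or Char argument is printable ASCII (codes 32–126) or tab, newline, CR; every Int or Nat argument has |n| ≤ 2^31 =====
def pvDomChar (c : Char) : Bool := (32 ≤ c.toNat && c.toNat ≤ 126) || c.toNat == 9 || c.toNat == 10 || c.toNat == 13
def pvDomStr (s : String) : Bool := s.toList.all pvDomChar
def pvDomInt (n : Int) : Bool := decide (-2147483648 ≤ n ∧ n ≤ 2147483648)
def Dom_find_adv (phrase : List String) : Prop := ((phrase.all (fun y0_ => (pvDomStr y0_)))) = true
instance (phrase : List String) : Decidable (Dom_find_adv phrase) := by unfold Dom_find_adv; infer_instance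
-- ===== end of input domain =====

-- B replaces A's find-first/slice recursion by a single left-to-right fold that
-- collects adverbs and resets the every-word collection at each adverb (simpler, one pass).


-- ===== PORT A =====
def advList : List String := ["here", "tonight", "yesterday", "tomorrow", "today", "now"]

def find_adv (phrase : List String) : List String :=
  if h : phrase = [] then []
  else
    -- for i in phrase: for j in adv_list: if j == i: return [i] + find_adv(phrase[phrase.index(i)+1:])
    match phrase.find? (fun i => advList.any (fun j => j == i)) with
    | some i =>
      match PySem.List.index? phrase i with
      | some n => i :: find_adv (PySem.List.slice phrase (some ((n : Int) + 1)) none)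
      | none => []  -- unreachable: i was found in phrase
    | none =>
      -- for k in phrase: if k.startswith('every'): return [k] + find_adv(phrase[phrase.index(k)+1:])
      match phrase.find? (fun k => PySem.Str.startswith k "every") with
      | some k =>
        match PySem.List.index? phrase k with
        | some m => k :: find_adv (PySem.List.slice phrase (some ((m : Int) + 1)) none)
        | none => []  -- unreachable: k was found in phrase
      | none => []
termination_by phrase.length
decreasing_by
  · rw [PySem.List.slice_from phrase (by omega : (0:Int) ≤ (n : Int) + 1)]
    have hlen : phrase.length ≠ 0 := fun hz => h (List.eq_nil_of_length_eq_zero hz)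
    simp only [List.length_drop]
    omega
  · rw [PySem.List.slice_from phrase (by omega : (0:Int) ≤ (m : Int) + 1)]
    have hlen : phrase.length ≠ 0 := fun hz => h (List.eq_nil_of_length_eq_zero hz)
    simp only [List.length_drop]
    omega

-- ===== PORT B =====
-- the loop body of B: adverbs are appended (resetting the every-collection), every-words collected
def stepB (acc : List String × List String) (t : String) : List String × List String :=
  if advList.contains t then (acc.1 ++ [t], [])
  else if PySem.Str.startswith t "every" then (acc.1, acc.2 ++ [t])
  else acc

def find_adv_alt (phrase : List String) : List String :=
  let r := phrase.foldl stepB ([], [])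
  r.1 ++ r.2

-- ===== PRECONDITION & SPEC =====
def Spec_find_adv (phrase : List String) (out : List String) : Prop := out = find_adv_alt phrase
instance (phrase : List String) (out : List String) : Decidable (Spec_find_adv phrase out) := by unfold Spec_find_adv; infer_instance

-- ===== CLAIM (what is proved, stated in full; the proofs are below) =====
def Claim_equal_find_adv : Prop := ∀ (phrase : List String), Dom_find_adv phrase → Spec_find_adv phrase (find_adv phrase)

-- ===== LEMMAS AND PROOFS =====

-- the two predicates the programs test
def advP (t : String) : Bool := advList.any (fun j => j == t)
def evP (t : String) : Bool := PySem.Str.startswith t "every"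

theorem advP_eq_contains (t : String) : advP t = advList.contains t := List.any_beq'

theorem bang_of_false {b : Bool} (h : b = false) : (!b) = true := by simp [h]

theorem false_of_bang {b : Bool} (h : (!b) = true) : b = false := by
  cases b
  · rfl
  · exact absurd h (by simp)

-- accumulator law for B's fold: the starting adverb list is prepended verbatim
theorem foldl_stepB_acc (xs : List String) (a e : List String) :
    xs.foldl stepB (a, e) = (a ++ (xs.foldl stepB ([], e)).1, (xs.foldl stepB ([], e)).2) := by
  induction xs generalizing a e with
  | nil => simp
  | cons x xs ih =>
    simp only [List.foldl_cons]
    by_cases h1 : advList.contains x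
    · have e1 : stepB (a, e) x = (a ++ [x], []) := by unfold stepB; rw [if_pos h1]
      have e2 : stepB ([], e) x = ([] ++ [x], []) := by unfold stepB; rw [if_pos h1]
      rw [e1, e2, ih (a ++ [x]) [], ih ([] ++ [x]) []]
      simp
    · by_cases h2 : PySem.Str.startswith x "every"
      · have e1 : stepB (a, e) x = (a, e ++ [x]) := by unfold stepB; rw [if_neg h1, if_pos h2]
        have e2 : stepB ([], e) x = ([], e ++ [x]) := by unfold stepB; rw [if_neg h1, if_pos h2]
        rw [e1, e2, ih a (e ++ [x]), ih [] (e ++ [x])]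
      · have e1 : stepB (a, e) x = (a, e) := by unfold stepB; rw [if_neg h1, if_neg h2]
        have e2 : stepB ([], e) x = ([], e) := by unfold stepB; rw [if_neg h1, if_neg h2]
        rw [e1, e2]
        exact ih a e

-- on an adverb-free list B's fold just appends the every-words
theorem foldl_stepB_no_adv (xs : List String) (a e : List String)
    (h : ∀ t ∈ xs, advP t = false) :
    xs.foldl stepB (a, e) = (a, e ++ xs.filter evP) := by
  induction xs generalizing e with
  | nil => simp
  | cons x xs ih =>
    have hx : advList.contains x = false := by
      rw [← advP_eq_contains]; exact h x (List.mem_cons_self ..)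
    have hrest : ∀ t ∈ xs, advP t = false := fun t ht => h t (List.mem_cons_of_mem _ ht)
    simp only [List.foldl_cons]
    by_cases h2 : PySem.Str.startswith x "every"
    · have e1 : stepB (a, e) x = (a, e ++ [x]) := by
        unfold stepB; rw [if_neg (by rw [hx]; simp), if_pos h2]
      rw [e1, ih (e ++ [x]) hrest, List.filter_cons]
      have : evP x = true := h2
      simp [this]
    · have e1 : stepB (a, e) x = (a, e) := by
        unfold stepB; rw [if_neg (by rw [hx]; simp), if_neg h2]
      rw [e1, ih e hrest, List.filter_cons]
      have : evP x = false := eq_false_of_ne_true h2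
      simp [this]

-- one unfolding of A when the first adverb is i, at position as.length
theorem find_adv_step_adv (as bs : List String) (i : String)
    (hi : advP i = true) (has : ∀ a ∈ as, advP a = false) :
    find_adv (as ++ i :: bs) = i :: find_adv bs := by
  have hne : as ++ i :: bs ≠ [] := by simp
  have hfind : (as ++ i :: bs).find? (fun t => advList.any (fun j => j == t)) = some i := by
    rw [List.find?_eq_some_iff_append]
    exact ⟨hi, as, bs, rfl, fun a ha => bang_of_false (has a ha)⟩
  have hnin : i ∉ as := fun hmem => by
    have h0 := has i hmem; rw [hi] at h0; exact (Bool.eq_not_self true).mp h0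
  have hidx : PySem.List.index? (as ++ i :: bs) i = some as.length :=
    (PySem.List.index?_eq_some_iff _ _ _).mpr ⟨as, bs, rfl, rfl, hnin⟩
  rw [find_adv.eq_def]
  simp only [dif_neg hne, hfind, hidx]
  rw [PySem.List.slice_from _ (by omega : (0:Int) ≤ (as.length : Int) + 1)]
  have hlen : ((as.length : Int) + 1).toNat = (as ++ [i]).length := by simp
  rw [hlen, show as ++ i :: bs = (as ++ [i]) ++ bs by simp, List.drop_left]

-- one unfolding of A when there is no adverb and the first every-word is k
theorem find_adv_step_ev (as bs : List String) (k : String)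
    (hadv : ∀ t ∈ as ++ k :: bs, advP t = false)
    (hk : evP k = true) (has : ∀ a ∈ as, evP a = false) :
    find_adv (as ++ k :: bs) = k :: find_adv bs := by
  have hne : as ++ k :: bs ≠ [] := by simp
  have hfind : (as ++ k :: bs).find? (fun t => advList.any (fun j => j == t)) = none :=
    List.find?_eq_none.mpr fun x hx hpx => by
      have h0 : advP x = true := hpx
      rw [hadv x hx] at h0; cases h0
  have hfind2 : (as ++ k :: bs).find? (fun t => PySem.Str.startswith t "every") = some k := by
    rw [List.find?_eq_some_iff_append]
    exact ⟨hk, as, bs, rfl, fun a ha => bang_of_false (has a ha)⟩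
  have hnin : k ∉ as := fun hmem => by
    have h0 := has k hmem; rw [hk] at h0; exact (Bool.eq_not_self true).mp h0
  have hidx : PySem.List.index? (as ++ k :: bs) k = some as.length :=
    (PySem.List.index?_eq_some_iff _ _ _).mpr ⟨as, bs, rfl, rfl, hnin⟩
  rw [find_adv.eq_def]
  simp only [dif_neg hne, hfind, hfind2, hidx]
  rw [PySem.List.slice_from _ (by omega : (0:Int) ≤ (as.length : Int) + 1)]
  have hlen : ((as.length : Int) + 1).toNat = (as ++ [k]).length := by simp
  rw [hlen, show as ++ k :: bs = (as ++ [k]) ++ bs by simp, List.drop_left]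

-- A on an adverb-free list returns exactly its every-words
theorem find_adv_no_adv : ∀ (n : Nat) (xs : List String), xs.length ≤ n →
    (∀ t ∈ xs, advP t = false) → find_adv xs = xs.filter evP := by
  intro n
  induction n with
  | zero =>
    intro xs hlen _
    have hx : xs = [] := List.eq_nil_of_length_eq_zero (Nat.le_zero.mp hlen)
    subst hx
    rw [find_adv.eq_def]; simp
  | succ n ih =>
    intro xs hlen hadv
    have hfind : xs.find? (fun t => advList.any (fun j => j == t)) = none :=
      List.find?_eq_none.mpr fun x hx hpx => by
        have h0 : advP x = true := hpx
        rw [hadv x hx] at h0; cases h0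
    match hfe : xs.find? (fun t => PySem.Str.startswith t "every") with
    | none =>
      have hnil : xs.filter evP = [] :=
        List.filter_eq_nil_iff.mpr fun a ha => List.find?_eq_none.mp hfe a ha
      rw [hnil, find_adv.eq_def]
      rcases eq_or_ne xs [] with h | h
      · simp [h]
      · simp only [dif_neg h, hfind, hfe]
    | some k =>
      obtain ⟨hk, as, bs, hdecomp, hfail⟩ := List.find?_eq_some_iff_append.mp hfe
      subst hdecomp
      have has : ∀ a ∈ as, evP a = false := fun a ha => false_of_bang (hfail a ha)
      rw [find_adv_step_ev as bs k hadv hk has]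
      have hbs : find_adv bs = bs.filter evP := by
        apply ih bs
        · simp at hlen ⊢; omega
        · exact fun t ht => hadv t (by simp [ht])
      rw [hbs, List.filter_append, List.filter_cons]
      have hasnil : as.filter evP = [] := List.filter_eq_nil_iff.mpr
        (fun a ha => by simp [has a ha])
      have hkev : evP k = true := hk
      simp [hasnil, hkev]

-- main equivalence, by strong induction on length
theorem find_adv_eq_alt : ∀ (n : Nat) (xs : List String), xs.length ≤ n →
    find_adv xs = find_adv_alt xs := by
  intro n
  induction n with
  | zero =>
    intro xs hlen
    have hx : xs = [] := List.eq_nil_of_length_eq_zero (Nat.le_zero.mp hlen)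
    subst hx
    rw [find_adv.eq_def]; simp [find_adv_alt]
  | succ n ih =>
    intro xs hlen
    match hfa : xs.find? (fun t => advList.any (fun j => j == t)) with
    | none =>
      have hadv : ∀ t ∈ xs, advP t = false := fun t ht =>
        eq_false_of_ne_true (List.find?_eq_none.mp hfa t ht)
      rw [find_adv_no_adv (n + 1) xs hlen hadv]
      show _ = (xs.foldl stepB ([], [])).1 ++ (xs.foldl stepB ([], [])).2
      rw [foldl_stepB_no_adv xs [] [] hadv]
      simp
    | some i =>
      obtain ⟨hi, as, bs, hdecomp, hfail⟩ := List.find?_eq_some_iff_append.mp hfa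
      subst hdecomp
      have has : ∀ a ∈ as, advP a = false := fun a ha => false_of_bang (hfail a ha)
      rw [find_adv_step_adv as bs i hi has]
      have hbs : find_adv bs = find_adv_alt bs := by
        apply ih bs; simp at hlen ⊢; omega
      rw [hbs]
      show _ = ((as ++ i :: bs).foldl stepB ([], [])).1 ++ ((as ++ i :: bs).foldl stepB ([], [])).2
      rw [List.foldl_append, foldl_stepB_no_adv as [] [] has]
      simp only [List.foldl_cons, List.nil_append]
      have hci : advList.contains i = true := by rw [← advP_eq_contains]; exact hi
      have e1 : stepB ([], List.filter evP as) i = ([i], []) := by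
        unfold stepB; rw [if_pos hci]; simp
      rw [e1, foldl_stepB_acc bs [i] []]
      simp [find_adv_alt]

-- ===== VERDICT (by name: the statement is the Claim_ definition above) =====
theorem find_adv_spec : Claim_equal_find_adv := by
  intro phrase _
  unfold Spec_find_adv
  exact find_adv_eq_alt phrase.length phrase (Nat.le_refl _)
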